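-- pv_equiv track=rewrite | github.com/SpangleLabs/Hallo | hallobase.py | fnn_calc_before
-- ===== SOURCE A (Python) =====
-- def fnn_calc_before(calc, sub):
--     pos = calc.find(str(sub))
--     if pos == 0:
--         return ''
--     pre_calc = calc[:pos]
--     num = ''
--     for nextchar in pre_calc[::-1]:
--         if(nextchar.isdigit() or nextchar == '.'):
--             num = nextchar + num
--         else:
--             break
--     return num
-- ===== SOURCE B (Python) =====
-- def fnn_calc_before(calc, sub):
--     # One forward pass: slice off everything from the first occurrence of sub
--     # (find's -1/not-found and pos==0 cases fall out of the slice), then track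
--     # where the trailing digit/dot run starts and return that suffix.
--     pre = calc[:calc.find(sub)]
--     start = 0
--     for i, ch in enumerate(pre):
--         if not (ch.isdigit() or ch == '.'):
--             start = i + 1
--     return pre[start:]
-- ===== Notes on version B (the rewrite author's own statement) =====
-- stated objective: simpler
-- what changed: Replaces the pos==0 early return plus reverse char-by-char prepend loop (with break) by a single forward enumerate pass that records where the trailing digit/dot run begins and returns that suffix slice; the found/not-found/pos==0 cases all fall out of one slice.
import Mathlib
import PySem

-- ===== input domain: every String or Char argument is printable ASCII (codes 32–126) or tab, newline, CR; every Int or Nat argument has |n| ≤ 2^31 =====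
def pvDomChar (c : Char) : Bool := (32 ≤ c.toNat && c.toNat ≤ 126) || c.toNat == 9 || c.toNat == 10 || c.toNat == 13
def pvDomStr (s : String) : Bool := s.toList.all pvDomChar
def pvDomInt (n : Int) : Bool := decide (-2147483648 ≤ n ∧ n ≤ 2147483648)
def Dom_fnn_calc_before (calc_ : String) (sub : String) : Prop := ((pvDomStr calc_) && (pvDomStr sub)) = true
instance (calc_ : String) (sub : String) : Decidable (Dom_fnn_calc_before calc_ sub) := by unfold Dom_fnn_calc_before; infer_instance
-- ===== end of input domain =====

-- B replaces A's reverse break-loop by one forward pass that records where the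
-- trailing digit/dot run starts (objective: simpler).

-- ===== PORT A =====
-- the 'for nextchar in pre_calc[::-1]' loop of A: prepend while digit/dot, else break
def fnnAGo : List Char → List Char → List Char
  | [], num => num
  | c :: rest, num =>
      if PySem.Chars.isdigit c || c == '.' then fnnAGo rest (c :: num) else num

def fnn_calc_before (calc_ : String) (sub : String) : String :=
  let pos := PySem.Str.find calc_ sub
  if pos == 0 then ""
  else
    let pre_calc := PySem.Str.slice calc_ none (some pos)
    -- pre_calc[::-1] is the reverse (PySem.Str.slice?_none_none_neg_one)
    String.ofList (fnnAGo pre_calc.toList.reverse [])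

-- ===== PORT B =====
def fnn_calc_before_alt (calc_ : String) (sub : String) : String :=
  let pre := PySem.Str.slice calc_ none (some (PySem.Str.find calc_ sub))
  let start := (PySem.List.enumerate pre.toList 0).foldl
      (fun s ic => if !(PySem.Chars.isdigit ic.2 || ic.2 == '.') then ic.1 + 1 else s) (0 : Int)
  PySem.Str.slice pre (some start) none

-- ===== PRECONDITION & SPEC =====
def Spec_fnn_calc_before (calc_ : String) (sub : String) (out : String) : Prop := out = fnn_calc_before_alt calc_ sub
instance (calc_ : String) (sub : String) (out : String) : Decidable (Spec_fnn_calc_before calc_ sub out) := by unfold Spec_fnn_calc_before; infer_instance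

-- ===== CLAIM (what is proved, stated in full; the proofs are below) =====
def Claim_equal_fnn_calc_before : Prop := ∀ (calc_ : String) (sub : String), Dom_fnn_calc_before calc_ sub → Spec_fnn_calc_before calc_ sub (fnn_calc_before calc_ sub)

-- ===== LEMMAS AND PROOFS =====

def fnnP (c : Char) : Bool := PySem.Chars.isdigit c || c == '.'

def fnnStart (l : List Char) : Int :=
  (PySem.List.enumerate l 0).foldl
    (fun s ic => if !(PySem.Chars.isdigit ic.2 || ic.2 == '.') then ic.1 + 1 else s) 0

lemma fnnAGo_eq (l acc : List Char) :
    fnnAGo l acc = (l.takeWhile fnnP).reverse ++ acc := by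
  induction l generalizing acc with
  | nil => simp [fnnAGo]
  | cons c rest ih =>
      by_cases h : fnnP c
      · rw [fnnAGo, if_pos (by simpa [fnnP] using h), ih,
          List.takeWhile_cons_of_pos h]
        simp
      · rw [fnnAGo, if_neg (by simpa [fnnP] using h),
          List.takeWhile_cons_of_neg h]
        simp

lemma fnnStart_append (l : List Char) (c : Char) :
    fnnStart (l ++ [c]) =
      if !(fnnP c) then (l.length : Int) + 1 else fnnStart l := by
  unfold fnnStart
  rw [PySem.List.enumerate_append, List.foldl_append]
  simp [fnnP]

lemma fnnStart_spec (l : List Char) :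
    0 ≤ fnnStart l ∧ (fnnStart l).toNat ≤ l.length ∧
      l.drop (fnnStart l).toNat = (l.reverse.takeWhile fnnP).reverse := by
  induction l using List.reverseRecOn with
  | nil => simp [fnnStart, PySem.List.enumerate]
  | append_singleton l c ih =>
      obtain ⟨h0, hle, hdrop⟩ := ih
      rw [fnnStart_append]
      by_cases hc : fnnP c
      · rw [if_neg (by simp [hc])]
        refine ⟨h0, by simp; omega, ?_⟩
        rw [List.drop_append_of_le_length hle, hdrop, List.reverse_append,
          List.reverse_singleton, List.singleton_append,
          List.takeWhile_cons_of_pos hc]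
        simp
      · rw [if_pos (by simp [hc])]
        have ht : ((l.length : Int) + 1).toNat = l.length + 1 := by omega
        refine ⟨by omega, by simp [ht], ?_⟩
        rw [ht, List.reverse_append, List.reverse_singleton,
          List.singleton_append, List.takeWhile_cons_of_neg hc]
        simp

lemma fnn_main (pre : String) :
    String.ofList (fnnAGo pre.toList.reverse []) =
      PySem.Str.slice pre (some (fnnStart pre.toList)) none := by
  obtain ⟨h0, hle, hdrop⟩ := fnnStart_spec pre.toList
  have hsl : (PySem.Str.slice pre (some (fnnStart pre.toList)) none).toList
      = fnnAGo pre.toList.reverse [] := by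
    rw [fnnAGo_eq, List.append_nil]
    simp only [PySem.Str.toList_slice, PySem.Chars.slice_eq_listSlice,
      PySem.List.slice_from _ h0]
    exact hdrop
  exact (String.toList_inj.mp (by simp [hsl])).symm

-- ===== VERDICT (by name: the statement is the Claim_ definition above) =====
theorem fnn_calc_before_spec : Claim_equal_fnn_calc_before := by
  intro calc_ sub _
  unfold Spec_fnn_calc_before fnn_calc_before fnn_calc_before_alt
  dsimp only
  have key : ∀ pre : String,
      PySem.Str.slice pre
        (some ((PySem.List.enumerate pre.toList 0).foldl
          (fun s ic => if !(PySem.Chars.isdigit ic.2 || ic.2 == '.') then ic.1 + 1 else s)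
          (0 : Int))) none
        = String.ofList (fnnAGo pre.toList.reverse []) :=
    fun pre => (fnn_main pre).symm
  rw [key]
  by_cases hpos : PySem.Str.find calc_ sub = 0
  · rw [if_pos (by simpa using hpos), hpos]
    have hpre : (PySem.Str.slice calc_ none (some (0 : Int))).toList = [] := by
      simp [PySem.List.slice_to _ (le_refl (0 : Int))]
    rw [hpre]
    simp [fnnAGo]
  · rw [if_neg (by simpa using hpos)]
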